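-- pv_equiv track=rewrite | github.com/RachelMantel/mcp-db-analyzer | src/mcp_db_analyzer/insights.py | find_orphan_tables
-- ===== SOURCE A (Python) =====
-- from typing import Any, Dict, List, Set
--
-- def find_orphan_tables(tables: List[Dict[str, Any]], fks: List[Dict[str, Any]]) -> List[str]:
--     """
--     Tables that have no incoming or outgoing foreign key relationships.
--     """
--     if not tables:
--         return []
--
--     outgoing = {fk.get("table") for fk in fks}
--     incoming = {fk.get("referred_table") for fk in fks}
--
--     orphans: List[str] = []
--     for table in tables:
--         name = table.get("table")
--         if not name:
--             continue
--         if name not in outgoing and name not in incoming: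
--             orphans.append(name)
--
--     return orphans
-- ===== SOURCE B (Python) =====
-- def find_orphan_tables(tables, fks):
--     """
--     Tables that have no incoming or outgoing foreign key relationships.
--     Strategy: start with every (truthy-named) table as a candidate, then walk
--     the FK list, crossing off each FK's two endpoints from the candidate list.
--     """
--     survivors = [t.get("table") for t in tables if t.get("table")]
--     for fk in fks:
--         doomed = {fk.get("table"), fk.get("referred_table")}
--         survivors = [n for n in survivors if n not in doomed]
--     return survivors
-- ===== Notes on version B (the rewrite author's own statement) =====
-- stated objective: alternative
-- what changed: Inverted the iteration: instead of testing each table against FK endpoint sets, B starts from the list of all named tables as candidates and walks the FK list, crossing off each FK's two endpoints; the survivors are the orphans.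
import Mathlib
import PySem

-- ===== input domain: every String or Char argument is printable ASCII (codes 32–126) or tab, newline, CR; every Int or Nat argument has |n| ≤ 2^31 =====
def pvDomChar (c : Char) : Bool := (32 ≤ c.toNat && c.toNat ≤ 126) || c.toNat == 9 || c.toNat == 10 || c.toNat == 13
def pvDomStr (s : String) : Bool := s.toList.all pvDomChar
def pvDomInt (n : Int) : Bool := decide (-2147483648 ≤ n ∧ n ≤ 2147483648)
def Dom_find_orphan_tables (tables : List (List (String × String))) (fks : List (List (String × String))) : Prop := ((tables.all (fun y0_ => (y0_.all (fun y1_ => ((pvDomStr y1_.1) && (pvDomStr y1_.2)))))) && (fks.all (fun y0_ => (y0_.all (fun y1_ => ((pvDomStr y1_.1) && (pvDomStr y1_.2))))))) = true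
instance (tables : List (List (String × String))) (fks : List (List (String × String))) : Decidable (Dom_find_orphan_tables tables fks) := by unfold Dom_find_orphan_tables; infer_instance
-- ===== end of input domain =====

-- B inverts the iteration: all named tables start as candidates and each FK crosses off its
-- two endpoints; same return value, similar cost (objective: alternative algorithm).

-- ===== PORT A =====
-- dict.get(k): first match in the association list (exact for the assoc-list dict convention)
def pvGetKey (d : List (String × String)) (k : String) : Option String :=
  (d.find? (fun p => p.1 == k)).map (fun p => p.2)

def find_orphan_tables (tables : List (List (String × String))) (fks : List (List (String × String))) : List String :=
  if tables = [] then []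
  else
    let outgoing : PySem.Set (Option String) :=
      PySem.Set.ofList (fks.map (fun fk => pvGetKey fk "table"))
    let incoming : PySem.Set (Option String) :=
      PySem.Set.ofList (fks.map (fun fk => pvGetKey fk "referred_table"))
    tables.foldl (fun orphans table =>
      match pvGetKey table "table" with
      | none => orphans
      | some name =>
        if name = "" then orphans
        else if (some name) ∉ outgoing ∧ (some name) ∉ incoming then orphans ++ [name]
        else orphans) []

-- ===== PORT B =====
-- B: candidates = all truthy table names; each fk removes its two endpoints from the candidates.
def find_orphan_tables_alt (tables : List (List (String × String))) (fks : List (List (String × String))) : List String :=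
  let survivors : List String := tables.filterMap (fun t =>
    match pvGetKey t "table" with
    | none => none
    | some n => if n = "" then none else some n)
  fks.foldl (fun surv fk =>
    let doomed : PySem.Set (Option String) :=
      PySem.Set.ofList [pvGetKey fk "table", pvGetKey fk "referred_table"]
    surv.filter (fun n => (some n) ∉ doomed)) survivors

-- ===== PRECONDITION & SPEC =====
def Spec_find_orphan_tables (tables : List (List (String × String))) (fks : List (List (String × String))) (out : List String) : Prop := out = find_orphan_tables_alt tables fks
instance (tables : List (List (String × String))) (fks : List (List (String × String))) (out : List String) : Decidable (Spec_find_orphan_tables tables fks out) := by unfold Spec_find_orphan_tables; infer_instance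

-- ===== CLAIM (what is proved, stated in full; the proofs are below) =====
def Claim_equal_find_orphan_tables : Prop := ∀ (tables : List (List (String × String))) (fks : List (List (String × String))), Dom_find_orphan_tables tables fks → Spec_find_orphan_tables tables fks (find_orphan_tables tables fks)

-- ===== LEMMAS AND PROOFS =====

-- the boolean "fk does not mention n" used in B's filter
def pvKeep (fk : List (String × String)) (n : String) : Bool :=
  decide ((some n) ∉ PySem.Set.ofList [pvGetKey fk "table", pvGetKey fk "referred_table"])

lemma alt_filter_eq (fk : List (String × String)) (surv : List String) :
    surv.filter (fun n => decide ((some n) ∉ PySem.Set.ofList [pvGetKey fk "table", pvGetKey fk "referred_table"]))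
      = surv.filter (pvKeep fk) := rfl

-- B's fold of filters = one filter by the conjunction over all fks
lemma foldl_filter_eq (fks : List (List (String × String))) (surv : List String) :
    fks.foldl (fun s fk => s.filter (pvKeep fk)) surv
      = surv.filter (fun n => fks.all (fun fk => pvKeep fk n)) := by
  induction fks generalizing surv with
  | nil => simp
  | cons fk fks ih =>
    simp only [List.foldl_cons, ih, List.filter_filter, List.all_cons]
    congr 1
    funext n
    exact Bool.and_comm _ _

-- A's fold with append = filterMap over tables
lemma foldl_append_eq (tables : List (List (String × String)))
    (p : String → Bool) (acc : List String) :
    tables.foldl (fun orphans table =>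
      match pvGetKey table "table" with
      | none => orphans
      | some name =>
        if name = "" then orphans
        else if p name then orphans ++ [name]
        else orphans) acc
    = acc ++ tables.filterMap (fun t =>
        match pvGetKey t "table" with
        | none => none
        | some n => if n = "" then none else if p n then some n else none) := by
  induction tables generalizing acc with
  | nil => simp
  | cons t ts ih =>
    simp only [List.foldl_cons, List.filterMap_cons]
    cases h : pvGetKey t "table" with
    | none => simp [ih]
    | some n =>
      by_cases hn : n = ""
      · simp [hn, ih]
      · by_cases hp : p n = true
        · simp [hn, hp, ih]
        · simp [hn, hp, ih]

-- "not an endpoint of any fk" : set-membership form ↔ all-scan form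
lemma cond_iff (fks : List (List (String × String))) (n : String) :
    ((some n) ∉ PySem.Set.ofList (fks.map (fun fk => pvGetKey fk "table")) ∧
     (some n) ∉ PySem.Set.ofList (fks.map (fun fk => pvGetKey fk "referred_table")))
    ↔ (fks.all (fun fk => pvKeep fk n) = true) := by
  simp only [pvKeep, PySem.Set.mem_ofList, List.mem_map, List.all_eq_true, decide_eq_true_eq,
    List.mem_cons, List.not_mem_nil]
  constructor
  · rintro ⟨h1, h2⟩ fk hfk hmem
    rcases hmem with h | h | h
    · exact h1 ⟨fk, hfk, h.symm⟩
    · exact h2 ⟨fk, hfk, h.symm⟩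
    · exact h
  · intro h
    constructor
    · rintro ⟨fk, hfk, he⟩
      exact h fk hfk (Or.inl he.symm)
    · rintro ⟨fk, hfk, he⟩
      exact h fk hfk (Or.inr (Or.inl he.symm))

-- ===== VERDICT (by name: the statement is the Claim_ definition above) =====
theorem find_orphan_tables_spec : Claim_equal_find_orphan_tables := by
  intro tables fks _
  unfold Spec_find_orphan_tables find_orphan_tables find_orphan_tables_alt
  simp only [alt_filter_eq, foldl_filter_eq]
  by_cases ht : tables = []
  · simp [ht]
  · simp only [ht, if_false]
    have hA := foldl_append_eq tables
      (fun n => decide ((some n) ∉ PySem.Set.ofList (fks.map (fun fk => pvGetKey fk "table")) ∧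
        (some n) ∉ PySem.Set.ofList (fks.map (fun fk => pvGetKey fk "referred_table")))) []
    simp only [decide_eq_true_eq] at hA
    rw [hA, List.nil_append, ← List.filterMap_eq_filter]
    rw [List.filterMap_filterMap]
    congr 1
    funext t
    cases h : pvGetKey t "table" with
    | none => rfl
    | some n =>
      by_cases hn : n = ""
      · simp [hn]
      · by_cases hc : fks.all (fun fk => pvKeep fk n) = true
        · simp [hn, (cond_iff fks n).mpr hc, Option.guard]
          exact List.all_eq_true.mp hc
        · simp only [hn, if_false]
          rw [if_neg (fun hcc => hc ((cond_iff fks n).mp hcc))]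
          simp only [Option.guard, Option.bind_some]
          rw [if_neg hc]
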